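-- pv_equiv track=rewrite | github.com/sean-zheng-amazon/opensearch-launchpad | opensearch_orchestrator/opensearch_ops_tools.py | _resolve_field_spec_for_doc_key
-- ===== SOURCE A (Python) =====
-- def _resolve_field_spec_for_doc_key(
--     field_name: str, field_specs: dict[str, dict[str, str]]
-- ) -> tuple[str, dict[str, str]]:
--     if field_name in field_specs:
--         return field_name, field_specs[field_name]
--
--     lowered = field_name.lower()
--     for candidate_name, candidate_spec in field_specs.items():
--         if candidate_name.lower() == lowered:
--             return candidate_name, candidate_spec
--
--     for candidate_name, candidate_spec in field_specs.items():
--         if candidate_name.split(".")[-1].lower() == lowered: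
--             return candidate_name, candidate_spec
--
--     return "", {}
-- ===== SOURCE B (Python) =====
-- def _resolve_field_spec_for_doc_key(field_name, field_specs):
--     lowered = field_name.lower()
--     best_priority, best_name, best_spec = 3, "", {}
--     for candidate_name, candidate_spec in field_specs.items():
--         if candidate_name == field_name:
--             priority = 0
--         elif candidate_name.lower() == lowered:
--             priority = 1
--         elif candidate_name.split(".")[-1].lower() == lowered:
--             priority = 2
--         else:
--             continue
--         if priority < best_priority:
--             best_priority, best_name, best_spec = priority, candidate_name, candidate_spec
--     return best_name, best_spec
-- ===== Notes on version B (the rewrite author's own statement) =====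
-- stated objective: alternative
-- what changed: Replaces A's membership test plus two separate scans of the dict with one single pass that ranks each entry (exact=0, case-insensitive=1, suffix=2) and keeps the first entry of the best rank seen.
import Mathlib
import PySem

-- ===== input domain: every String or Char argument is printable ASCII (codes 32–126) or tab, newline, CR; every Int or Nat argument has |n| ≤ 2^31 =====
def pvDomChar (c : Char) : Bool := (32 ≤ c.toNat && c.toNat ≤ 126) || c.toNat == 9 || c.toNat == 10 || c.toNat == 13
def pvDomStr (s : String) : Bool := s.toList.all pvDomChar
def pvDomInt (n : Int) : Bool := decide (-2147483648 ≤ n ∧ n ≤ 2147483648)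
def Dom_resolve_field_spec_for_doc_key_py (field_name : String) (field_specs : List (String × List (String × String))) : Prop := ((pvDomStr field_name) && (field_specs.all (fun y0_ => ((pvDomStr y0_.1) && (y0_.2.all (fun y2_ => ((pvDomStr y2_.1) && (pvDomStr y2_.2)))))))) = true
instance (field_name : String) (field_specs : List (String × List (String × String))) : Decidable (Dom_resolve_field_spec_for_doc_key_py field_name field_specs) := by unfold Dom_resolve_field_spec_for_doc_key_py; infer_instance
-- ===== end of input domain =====

-- B replaces A's membership test plus two further scans with one single pass keeping the
-- first entry of the best match rank (exact 0, case-insensitive 1, suffix 2); alternative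
-- decomposition, same result.

-- ===== PORT A =====
-- for-loop with early return over .items(), case-insensitive full-name match
def pvA_loopCI (lowered : String) : List (String × List (String × String)) → Option (String × List (String × String))
  | [] => none
  | (n, s) :: rest =>
    if PySem.Str.lower n == lowered then some (n, s) else pvA_loopCI lowered rest

-- for-loop with early return over .items(), case-insensitive last-dot-segment match
def pvA_loopSuf (lowered : String) : List (String × List (String × String)) → Option (String × List (String × String))
  | [] => none
  | (n, s) :: rest =>
    if PySem.Str.lower (PySem.List.pyGetD ((PySem.Str.split? n ".").getD []) (-1) "") == lowered then
      some (n, s)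
    else pvA_loopSuf lowered rest

def resolve_field_spec_for_doc_key_py (field_name : String) (field_specs : List (String × List (String × String))) : String × (List (String × String)) :=
  -- 'field_name in field_specs' / 'field_specs[field_name]': first matching key of the assoc list
  match field_specs.find? (fun e => e.1 == field_name) with
  | some e => (field_name, e.2)
  | none =>
    let lowered := PySem.Str.lower field_name
    match pvA_loopCI lowered field_specs with
    | some e => e
    | none =>
      match pvA_loopSuf lowered field_specs with
      | some e => e
      | none => ("", [])

-- ===== PORT B =====
-- the if/elif/elif/else-continue priority assignment of Source B
def pvB_prio (field_name lowered n : String) : Option Nat :=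
  if n == field_name then some 0
  else if PySem.Str.lower n == lowered then some 1
  else if PySem.Str.lower (PySem.List.pyGetD ((PySem.Str.split? n ".").getD []) (-1) "") == lowered then some 2
  else none

-- one iteration of Source B's loop: strict-less update of (best_priority, best_name, best_spec)
def pvB_step (field_name lowered : String) (best : Nat × String × List (String × String)) (e : String × List (String × String)) : Nat × String × List (String × String) :=
  match pvB_prio field_name lowered e.1 with
  | none => best
  | some p => if p < best.1 then (p, e.1, e.2) else best

def resolve_field_spec_for_doc_key_py_alt (field_name : String) (field_specs : List (String × List (String × String))) : String × (List (String × String)) :=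
  let lowered := PySem.Str.lower field_name
  let r := field_specs.foldl (pvB_step field_name lowered) (3, "", [])
  (r.2.1, r.2.2)

-- ===== PRECONDITION & SPEC =====
def Spec_resolve_field_spec_for_doc_key_py (field_name : String) (field_specs : List (String × List (String × String))) (out : String × (List (String × String))) : Prop := out = resolve_field_spec_for_doc_key_py_alt field_name field_specs
instance (field_name : String) (field_specs : List (String × List (String × String))) (out : String × (List (String × String))) : Decidable (Spec_resolve_field_spec_for_doc_key_py field_name field_specs out) := by unfold Spec_resolve_field_spec_for_doc_key_py; infer_instance

-- ===== CLAIM (what is proved, stated in full; the proofs are below) =====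
def Claim_equal_resolve_field_spec_for_doc_key_py : Prop := ∀ (field_name : String) (field_specs : List (String × List (String × String))), Dom_resolve_field_spec_for_doc_key_py field_name field_specs → Spec_resolve_field_spec_for_doc_key_py field_name field_specs (resolve_field_spec_for_doc_key_py field_name field_specs)

-- ===== LEMMAS AND PROOFS =====

-- A's first loop is find? of the case-insensitive predicate
theorem pvA_loopCI_eq_find? (lowered : String) (l : List (String × List (String × String))) :
    pvA_loopCI lowered l = l.find? (fun e => PySem.Str.lower e.1 == lowered) := by
  induction l with
  | nil => rfl
  | cons hd tl ih =>
    obtain ⟨n, s⟩ := hd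
    by_cases h : PySem.Str.lower n = lowered
    · rw [List.find?_cons_of_pos (p := fun (e : String × List (String × String)) => PySem.Str.lower e.1 == lowered) (by simp [h])]
      simp [pvA_loopCI, h]
    · rw [List.find?_cons_of_neg (p := fun (e : String × List (String × String)) => PySem.Str.lower e.1 == lowered) (by simp [h])]
      simp [pvA_loopCI, h, ih]

-- A's second loop is find? of the suffix predicate
theorem pvA_loopSuf_eq_find? (lowered : String) (l : List (String × List (String × String))) :
    pvA_loopSuf lowered l = l.find? (fun e => PySem.Str.lower (PySem.List.pyGetD ((PySem.Str.split? e.1 ".").getD []) (-1) "") == lowered) := by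
  induction l with
  | nil => rfl
  | cons hd tl ih =>
    obtain ⟨n, s⟩ := hd
    by_cases h : PySem.Str.lower (PySem.List.pyGetD ((PySem.Str.split? n ".").getD []) (-1) "") = lowered
    · rw [List.find?_cons_of_pos (p := fun (e : String × List (String × String)) => PySem.Str.lower (PySem.List.pyGetD ((PySem.Str.split? e.1 ".").getD []) (-1) "") == lowered) (by simp [h])]
      simp [pvA_loopSuf, h]
    · rw [List.find?_cons_of_neg (p := fun (e : String × List (String × String)) => PySem.Str.lower (PySem.List.pyGetD ((PySem.Str.split? e.1 ".").getD []) (-1) "") == lowered) (by simp [h])]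
      simp [pvA_loopSuf, h, ih]

-- once best_priority = 0 the fold never updates
theorem pvB_fold0 (fn lowered bn : String) (bs : List (String × String)) (l : List (String × List (String × String))) :
    l.foldl (pvB_step fn lowered) (0, bn, bs) = (0, bn, bs) := by
  induction l with
  | nil => rfl
  | cons hd tl ih =>
    have hstep : pvB_step fn lowered (0, bn, bs) hd = (0, bn, bs) := by
      unfold pvB_step pvB_prio
      split_ifs <;> simp
    simp [List.foldl, hstep, ih]

-- with best_priority = 1 only an exact match can still update
theorem pvB_fold1 (fn lowered bn : String) (bs : List (String × String)) (l : List (String × List (String × String))) :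
    l.foldl (pvB_step fn lowered) (1, bn, bs) =
      match l.find? (fun e => e.1 == fn) with
      | some e => (0, e.1, e.2)
      | none => (1, bn, bs) := by
  induction l generalizing bn bs with
  | nil => rfl
  | cons hd tl ih =>
    obtain ⟨n, s⟩ := hd
    by_cases h0 : n = fn
    · rw [List.find?_cons_of_pos (p := fun (e : String × List (String × String)) => e.1 == fn) (by simp [h0])]
      have hstep : pvB_step fn lowered (1, bn, bs) (n, s) = (0, n, s) := by
        unfold pvB_step pvB_prio
        split_ifs <;> simp_all
      simp [List.foldl, hstep, pvB_fold0]
    · rw [List.find?_cons_of_neg (p := fun (e : String × List (String × String)) => e.1 == fn) (by simp [h0])]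
      have hstep : pvB_step fn lowered (1, bn, bs) (n, s) = (1, bn, bs) := by
        unfold pvB_step pvB_prio
        split_ifs <;> simp_all
      simp only [List.foldl, hstep, ih]

-- with best_priority = 2 exact and case-insensitive matches can still update
theorem pvB_fold2 (fn lowered bn : String) (bs : List (String × String)) (l : List (String × List (String × String))) :
    l.foldl (pvB_step fn lowered) (2, bn, bs) =
      match l.find? (fun e => e.1 == fn) with
      | some e => (0, e.1, e.2)
      | none =>
        match l.find? (fun e => PySem.Str.lower e.1 == lowered) with
        | some e => (1, e.1, e.2)
        | none => (2, bn, bs) := by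
  induction l generalizing bn bs with
  | nil => rfl
  | cons hd tl ih =>
    obtain ⟨n, s⟩ := hd
    by_cases h0 : n = fn
    · rw [List.find?_cons_of_pos (p := fun (e : String × List (String × String)) => e.1 == fn) (by simp [h0])]
      have hstep : pvB_step fn lowered (2, bn, bs) (n, s) = (0, n, s) := by
        unfold pvB_step pvB_prio
        split_ifs <;> simp_all
      simp [List.foldl, hstep, pvB_fold0]
    · rw [List.find?_cons_of_neg (p := fun (e : String × List (String × String)) => e.1 == fn) (by simp [h0])]
      by_cases h1 : PySem.Str.lower n = lowered
      · rw [List.find?_cons_of_pos (p := fun (e : String × List (String × String)) => PySem.Str.lower e.1 == lowered) (by simp [h1])]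
        have hstep : pvB_step fn lowered (2, bn, bs) (n, s) = (1, n, s) := by
          unfold pvB_step pvB_prio
          split_ifs <;> simp_all
        simp only [List.foldl, hstep, pvB_fold1]
      · rw [List.find?_cons_of_neg (p := fun (e : String × List (String × String)) => PySem.Str.lower e.1 == lowered) (by simp [h1])]
        have hstep : pvB_step fn lowered (2, bn, bs) (n, s) = (2, bn, bs) := by
          unfold pvB_step pvB_prio
          split_ifs <;> simp_all
        simp only [List.foldl, hstep, ih]

-- full characterisation of B's single pass from the initial state (3, "", [])
theorem pvB_fold3 (fn lowered : String) (l : List (String × List (String × String))) :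
    l.foldl (pvB_step fn lowered) (3, "", []) =
      match l.find? (fun e => e.1 == fn) with
      | some e => (0, e.1, e.2)
      | none =>
        match l.find? (fun e => PySem.Str.lower e.1 == lowered) with
        | some e => (1, e.1, e.2)
        | none =>
          match l.find? (fun e => PySem.Str.lower (PySem.List.pyGetD ((PySem.Str.split? e.1 ".").getD []) (-1) "") == lowered) with
          | some e => (2, e.1, e.2)
          | none => (3, "", []) := by
  induction l with
  | nil => rfl
  | cons hd tl ih =>
    obtain ⟨n, s⟩ := hd
    by_cases h0 : n = fn
    · rw [List.find?_cons_of_pos (p := fun (e : String × List (String × String)) => e.1 == fn) (by simp [h0])]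
      have hstep : pvB_step fn lowered (3, "", []) (n, s) = (0, n, s) := by
        unfold pvB_step pvB_prio
        split_ifs <;> simp_all
      simp [List.foldl, hstep, pvB_fold0]
    · rw [List.find?_cons_of_neg (p := fun (e : String × List (String × String)) => e.1 == fn) (by simp [h0])]
      by_cases h1 : PySem.Str.lower n = lowered
      · rw [List.find?_cons_of_pos (p := fun (e : String × List (String × String)) => PySem.Str.lower e.1 == lowered) (by simp [h1])]
        have hstep : pvB_step fn lowered (3, "", []) (n, s) = (1, n, s) := by
          unfold pvB_step pvB_prio
          split_ifs <;> simp_all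
        simp only [List.foldl, hstep, pvB_fold1]
      · rw [List.find?_cons_of_neg (p := fun (e : String × List (String × String)) => PySem.Str.lower e.1 == lowered) (by simp [h1])]
        by_cases h2 : PySem.Str.lower (PySem.List.pyGetD ((PySem.Str.split? n ".").getD []) (-1) "") = lowered
        · rw [List.find?_cons_of_pos (p := fun (e : String × List (String × String)) => PySem.Str.lower (PySem.List.pyGetD ((PySem.Str.split? e.1 ".").getD []) (-1) "") == lowered) (by simp [h2])]
          have hstep : pvB_step fn lowered (3, "", []) (n, s) = (2, n, s) := by
            unfold pvB_step pvB_prio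
            split_ifs <;> simp_all
          simp only [List.foldl, hstep, pvB_fold2]
        · rw [List.find?_cons_of_neg (p := fun (e : String × List (String × String)) => PySem.Str.lower (PySem.List.pyGetD ((PySem.Str.split? e.1 ".").getD []) (-1) "") == lowered) (by simp [h2])]
          have hstep : pvB_step fn lowered (3, "", []) (n, s) = (3, "", []) := by
            unfold pvB_step pvB_prio
            split_ifs <;> simp_all
          simp only [List.foldl, hstep, ih]

-- ===== VERDICT (by name: the statement is the Claim_ definition above) =====
theorem resolve_field_spec_for_doc_key_py_spec : Claim_equal_resolve_field_spec_for_doc_key_py := by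
  intro fn fs _
  unfold Spec_resolve_field_spec_for_doc_key_py
  simp only [resolve_field_spec_for_doc_key_py, resolve_field_spec_for_doc_key_py_alt]
  rw [pvB_fold3, pvA_loopCI_eq_find?, pvA_loopSuf_eq_find?]
  cases hf0 : fs.find? (fun e => e.1 == fn) with
  | some e =>
    have he : e.1 = fn := by simpa using List.find?_some hf0
    simp [he]
  | none =>
    cases hf1 : fs.find? (fun e => PySem.Str.lower e.1 == PySem.Str.lower fn) with
    | some e => simp
    | none =>
      cases hf2 : fs.find? (fun e => PySem.Str.lower (PySem.List.pyGetD ((PySem.Str.split? e.1 ".").getD []) (-1) "") == PySem.Str.lower fn) with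
      | some e => simp
      | none => simp
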